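-- pv_equiv track=rewrite | github.com/peppla/glasstty | tools/outline.py | runs_in
-- ===== SOURCE A (Python) =====
-- def runs_in(cols: set) -> list[tuple[int, int]]:
--     """Contiguous column runs from a set of column indices, as
--     (start, end_inclusive) pairs."""
--     if not cols:
--         return []
--     sorted_cols = sorted(cols)
--     result: list[tuple[int, int]] = []
--     start = prev = sorted_cols[0]
--     for c in sorted_cols[1:]:
--         if c == prev + 1:
--             prev = c
--             continue
--         result.append((start, prev))
--         start = prev = c
--     result.append((start, prev))
--     return result
-- ===== SOURCE B (Python) =====
-- def runs_in(cols: set) -> list[tuple[int, int]]: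
--     """Contiguous column runs from a set of column indices, as
--     (start, end_inclusive) pairs."""
--     starts = sorted(c for c in cols if c - 1 not in cols)
--     ends = sorted(c for c in cols if c + 1 not in cols)
--     return list(zip(starts, ends))
-- ===== Notes on version B (the rewrite author's own statement) =====
-- stated objective: alternative
-- what changed: Instead of a sorted linear scan that tracks start/prev and cuts a run when the gap test fails, B detects run boundaries by set membership (c-1 not in cols gives starts, c+1 not in cols gives ends), sorts each boundary list and zips them.
import Mathlib
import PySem

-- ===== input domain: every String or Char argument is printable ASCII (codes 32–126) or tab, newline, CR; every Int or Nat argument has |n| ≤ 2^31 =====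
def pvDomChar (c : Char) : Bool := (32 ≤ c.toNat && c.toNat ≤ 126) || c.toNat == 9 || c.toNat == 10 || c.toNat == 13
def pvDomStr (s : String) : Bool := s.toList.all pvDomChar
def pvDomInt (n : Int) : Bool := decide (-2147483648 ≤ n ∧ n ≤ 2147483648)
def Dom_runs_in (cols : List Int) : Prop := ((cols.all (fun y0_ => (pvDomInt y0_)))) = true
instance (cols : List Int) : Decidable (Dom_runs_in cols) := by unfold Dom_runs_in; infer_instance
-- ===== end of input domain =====

-- B finds run boundaries by membership tests (c-1/c+1 in the set) and zips the sorted
-- boundary lists, instead of A's sorted scan with start/prev state; same cost, different algorithm.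


-- ===== PORT A =====
def runs_in (cols : List Int) : List (Int × Int) :=
  if cols = [] then []
  else
    match PySem.List.sorted cols (fun x => x) false with
    | [] => []   -- unreachable: cols ≠ []
    | h :: t =>
      let st := t.foldl
        (fun (acc : List (Int × Int) × Int × Int) c =>
          if c = acc.2.2 + 1 then (acc.1, acc.2.1, c)
          else (acc.1 ++ [(acc.2.1, acc.2.2)], c, c))
        ([], h, h)
      st.1 ++ [(st.2.1, st.2.2)]

-- ===== PORT B =====
def runs_in_alt (cols : List Int) : List (Int × Int) :=
  let starts := PySem.List.sorted (cols.filter (fun c => !(cols.contains (c - 1)))) (fun x => x) false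
  let ends := PySem.List.sorted (cols.filter (fun c => !(cols.contains (c + 1)))) (fun x => x) false
  starts.zip ends

-- ===== PRECONDITION & SPEC =====
-- Pre_ requires distinct elements: the argument is a Python set, whose List Int encoding
-- holds the distinct elements, so a list with duplicates represents no actual Python input.
def Pre_runs_in (cols : List Int) : Prop := cols.Nodup
instance (cols : List Int) : Decidable (Pre_runs_in cols) := by unfold Pre_runs_in; infer_instance
def pvWitness_runs_in : List Int := [3, 1, 2, 7, 10, 9]
def Spec_runs_in (cols : List Int) (out : List (Int × Int)) : Prop := out = runs_in_alt cols
instance (cols : List Int) (out : List (Int × Int)) : Decidable (Spec_runs_in cols out) := by unfold Spec_runs_in; infer_instance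

-- ===== CLAIM (what is proved, stated in full; the proofs are below) =====
def Claim_equal_runs_in : Prop := ∀ (cols : List Int), Dom_runs_in cols → Pre_runs_in cols → Spec_runs_in cols (runs_in cols)

-- ===== LEMMAS AND PROOFS =====

-- run starts detected by adjacency, given the previous element p
def startsGo (p : Int) : List Int → List Int
  | [] => []
  | c :: t => if c = p + 1 then startsGo c t else c :: startsGo c t

-- run ends detected by adjacency, given the previous element p
def endsGo (p : Int) : List Int → List Int
  | [] => [p]
  | c :: t => (if c = p + 1 then [] else [p]) ++ endsGo c t

-- A's scan, written as structural recursion without the accumulator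
def runsAux (start prev : Int) : List Int → List (Int × Int)
  | [] => [(start, prev)]
  | c :: t => if c = prev + 1 then runsAux start c t else (start, prev) :: runsAux c c t

theorem fold_eq_runsAux (t : List Int) : ∀ (res : List (Int × Int)) (start prev : Int),
    (let st := t.foldl
        (fun (acc : List (Int × Int) × Int × Int) c =>
          if c = acc.2.2 + 1 then (acc.1, acc.2.1, c)
          else (acc.1 ++ [(acc.2.1, acc.2.2)], c, c))
        (res, start, prev)
     st.1 ++ [(st.2.1, st.2.2)]) = res ++ runsAux start prev t := by
  induction t with
  | nil => intro res start prev; simp [runsAux]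
  | cons c t ih =>
    intro res start prev
    by_cases h : c = prev + 1 <;> simp [runsAux, h, ih, List.append_assoc]

theorem zip_eq_runsAux (t : List Int) : ∀ (start prev : Int),
    (start :: startsGo prev t).zip (endsGo prev t) = runsAux start prev t := by
  induction t with
  | nil => intro start prev; simp [startsGo, endsGo, runsAux]
  | cons c t ih =>
    intro start prev
    by_cases h : c = prev + 1 <;> simp [startsGo, endsGo, runsAux, h, ih]

theorem starts_filter (s : List Int) (u : List Int) : ∀ (p : Int),
    p ∈ s → (∀ x ∈ s, x ≤ p ∨ x ∈ u) → u.Pairwise (· < ·) → (∀ x ∈ u, p < x) →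
    (∀ x ∈ u, x ∈ s) →
    u.filter (fun c => !(s.contains (c - 1))) = startsGo p u := by
  induction u with
  | nil => intro p _ _ _ _ _; simp [startsGo]
  | cons c t ih =>
    intro p hps hcover hpw hgt hsub
    have hct : ∀ x ∈ t, c < x := (List.pairwise_cons.mp hpw).1
    have hpc : p < c := hgt c (by simp)
    have hmem : (s.contains (c - 1)) = decide (c = p + 1) := by
      by_cases h : c = p + 1
      · have hcp : c - 1 = p := by omega
        rw [hcp]
        simp [hps, h]
      · have hnot : c - 1 ∉ s := by
          intro hin
          rcases hcover _ hin with hle | hinu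
          · omega
          · rcases List.mem_cons.mp hinu with h1 | h2
            · omega
            · have := hct _ h2; omega
        simp [h, hnot]
    have ih' := ih c (hsub c (by simp))
      (by intro x hx; rcases hcover x hx with h1 | h2
          · left; omega
          · rcases List.mem_cons.mp h2 with h3 | h4
            · left; omega
            · right; exact h4)
      ((List.pairwise_cons.mp hpw).2) hct (fun x hx => hsub x (by simp [hx]))
    rw [List.filter_cons, hmem, ih']
    by_cases h : c = p + 1 <;> simp [startsGo, h]

theorem ends_filter (s : List Int) (u : List Int) : ∀ (p : Int),
    (∀ x ∈ s, x ≤ p ∨ x ∈ u) → u.Pairwise (· < ·) → (∀ x ∈ u, p < x) →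
    (∀ x ∈ u, x ∈ s) →
    (if s.contains (p + 1) then [] else [p]) ++ u.filter (fun c => !(s.contains (c + 1)))
      = endsGo p u := by
  induction u with
  | nil =>
    intro p hcover _ _ _
    have hnot : p + 1 ∉ s := by
      intro hin
      rcases hcover _ hin with hle | hf
      · omega
      · simp at hf
    have hc : s.contains (p + 1) = false := by
      simp [hnot]
    rw [hc]
    simp [endsGo]
  | cons c t ih =>
    intro p hcover hpw hgt hsub
    have hct : ∀ x ∈ t, c < x := (List.pairwise_cons.mp hpw).1
    have hpc : p < c := hgt c (by simp)
    have hmem : (s.contains (p + 1)) = decide (c = p + 1) := by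
      by_cases h : c = p + 1
      · have hcs : p + 1 ∈ s := h ▸ hsub c (by simp)
        simp [hcs, h]
      · have hnot : p + 1 ∉ s := by
          intro hin
          rcases hcover _ hin with hle | hinu
          · omega
          · rcases List.mem_cons.mp hinu with h1 | h2
            · omega
            · have := hct _ h2; omega
        simp [h, hnot]
    have ih' := ih c
      (by intro x hx; rcases hcover x hx with h1 | h2
          · left; omega
          · rcases List.mem_cons.mp h2 with h3 | h4
            · left; omega
            · right; exact h4)
      ((List.pairwise_cons.mp hpw).2) hct (fun x hx => hsub x (by simp [hx]))
    rw [List.filter_cons, hmem]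
    simp only [endsGo]
    rw [← ih']
    by_cases h : c = p + 1 <;> by_cases h2 : s.contains (c + 1) = true <;>
      simp [h] <;> split <;> simp

-- ===== VERDICT (by name: the statement is the Claim_ definition above) =====
theorem runs_in_spec : Claim_equal_runs_in := by
  intro cols _ hnd
  unfold Spec_runs_in runs_in runs_in_alt
  by_cases hnil : cols = []
  · subst hnil
    simp [PySem.List.sorted_eq_nil_iff]
  · simp only [hnil, if_false]
    split
    case h_1 heq =>
      exact absurd ((PySem.List.sorted_eq_nil_iff ..).mp heq) hnil
    case h_2 h t heq =>
      have hperm : (h :: t).Perm cols := heq ▸ PySem.List.sorted_perm ..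
      have hmemiff : ∀ x, x ∈ (h :: t) ↔ x ∈ cols := fun x => hperm.mem_iff
      have hnds : (h :: t).Nodup := hperm.nodup_iff.mpr hnd
      have hsort : (h :: t).Pairwise (· ≤ ·) := by
        have := PySem.List.sorted_pairwise (xs := cols) (key := fun x => x) (κ := Int)
        rw [heq] at this
        simpa using this
      have hlt : (h :: t).Pairwise (· < ·) :=
        (hsort.and hnds).imp (fun hx => lt_of_le_of_ne hx.1 hx.2)
      have hht : ∀ x ∈ t, h < x := (List.pairwise_cons.mp hlt).1
      have htpw : t.Pairwise (· < ·) := (List.pairwise_cons.mp hlt).2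
      have hcov : ∀ x ∈ (h :: t), x ≤ h ∨ x ∈ t := by
        intro x hx
        rcases List.mem_cons.mp hx with h1 | h2
        · left; omega
        · right; assumption
      have hcontains : ∀ y, cols.contains y = (h :: t).contains y := by
        intro y; simp [hmemiff]
      have hfs : ∀ q : Int → Bool,
          PySem.List.sorted (cols.filter q) (fun x => x) false = (h :: t).filter q := by
        intro q
        apply PySem.List.sorted_eq_of_perm_of_pairwise_lt
        · exact hperm.filter q
        · exact hlt.filter q
      have hstarts : (h :: t).filter (fun c => !((h :: t).contains (c - 1)))
          = h :: startsGo h t := by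
        have hh : ((h :: t).contains (h - 1)) = false := by
          have hni : h - 1 ∉ (h :: t) := by
            intro hin
            rcases List.mem_cons.mp hin with h1 | h2
            · omega
            · have := hht _ h2; omega
          simpa using hni
        rw [List.filter_cons]
        simp only [hh]
        rw [starts_filter (h :: t) t h (by simp) hcov htpw hht
          (fun x hx => by simp [hx])]
        simp
      have hends : (h :: t).filter (fun c => !((h :: t).contains (c + 1)))
          = endsGo h t := by
        rw [List.filter_cons]
        rw [← ends_filter (h :: t) t h hcov htpw hht (fun x hx => by simp [hx])]
        by_cases hc : (h :: t).contains (h + 1) = true <;> simp [hc] <;> split <;> simp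
      calc
        (let st := t.foldl
            (fun (acc : List (Int × Int) × Int × Int) c =>
              if c = acc.2.2 + 1 then (acc.1, acc.2.1, c)
              else (acc.1 ++ [(acc.2.1, acc.2.2)], c, c))
            ([], h, h)
         st.1 ++ [(st.2.1, st.2.2)])
            = runsAux h h t := by simpa using fold_eq_runsAux t [] h h
        _ = (h :: startsGo h t).zip (endsGo h t) := (zip_eq_runsAux t h h).symm
        _ = ((h :: t).filter (fun c => !((h :: t).contains (c - 1)))).zip
              ((h :: t).filter (fun c => !((h :: t).contains (c + 1)))) := by
            rw [hstarts, hends]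
        _ = (PySem.List.sorted (cols.filter (fun c => !(cols.contains (c - 1)))) (fun x => x) false).zip
              (PySem.List.sorted (cols.filter (fun c => !(cols.contains (c + 1)))) (fun x => x) false) := by
            rw [hfs, hfs]
            have e1 : (fun c => !(cols.contains (c - 1))) = (fun c => !((h :: t).contains (c - 1))) := by
              funext c; rw [hcontains]
            have e2 : (fun c => !(cols.contains (c + 1))) = (fun c => !((h :: t).contains (c + 1))) := by
              funext c; rw [hcontains]
            rw [e1, e2]
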